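-- pv_equiv track=rewrite | github.com/Zaidkhan0407/DSA | Practice.py | RSC
-- ===== SOURCE A (Python) =====
-- def RSC(s,sub):
--     if len(s)<=0 and len(sub)<=0:
--         return True
--     if len(s)<=0:
--         return False
--     if s[0]!=sub[0]:
--         return RSC(s[1:],sub)
--     return RSC(s[1:],sub[1:])
-- ===== SOURCE B (Python) =====
-- def RSC(s, sub):
--     j = 0
--     for c in s:
--         if j < len(sub) and c == sub[j]:
--             j += 1
--     return j == len(sub)
-- ===== Notes on version B (the rewrite author's own statement) =====
-- stated objective: faster
-- what changed: replaces the slice-per-step recursion with a single iterative two-pointer scan over s (an index into sub), no slicing and no recursion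
-- crash fix: A raises IndexError whenever the greedy match exhausts sub strictly before s is exhausted (i.e. s is nonempty and sub is a subsequence of s[:-1]); B returns True there. — e.g. on RSC("ab", "a"): A raises IndexError, B returns true
import Mathlib
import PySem

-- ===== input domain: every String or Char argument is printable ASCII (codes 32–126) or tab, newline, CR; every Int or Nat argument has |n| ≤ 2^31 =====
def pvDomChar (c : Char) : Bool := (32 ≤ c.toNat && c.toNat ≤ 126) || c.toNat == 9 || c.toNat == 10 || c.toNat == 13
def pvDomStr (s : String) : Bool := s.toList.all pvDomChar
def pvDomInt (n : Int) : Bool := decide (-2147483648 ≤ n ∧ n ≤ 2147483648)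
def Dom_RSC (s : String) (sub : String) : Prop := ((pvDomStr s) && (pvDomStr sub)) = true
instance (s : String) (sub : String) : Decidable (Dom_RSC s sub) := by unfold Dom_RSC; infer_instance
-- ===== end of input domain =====

-- B replaces A's slice-per-step recursion by a single two-pointer scan over s; equivalence is on
-- the return value (A raises IndexError where sub is exhausted early; those inputs are outside Pre_).

-- ===== PORT A =====
-- literal transliteration of A's recursion on the character lists; the branch where Python
-- evaluates sub[0] on an empty sub (IndexError) returns false here and is excluded by Pre_RSC
def RSC_go : List Char → List Char → Bool
  | [], [] => true                                   -- len(s)<=0 and len(sub)<=0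
  | [], _ :: _ => false                              -- len(s)<=0
  | _ :: _, [] => false                              -- Python raises IndexError (outside Pre_RSC)
  | c :: s', d :: sub' =>
      if c ≠ d then RSC_go s' (d :: sub')            -- s[0]!=sub[0]: RSC(s[1:],sub)
      else RSC_go s' sub'                            -- RSC(s[1:],sub[1:])

def RSC (s : String) (sub : String) : Bool := RSC_go s.toList sub.toList

-- ===== PORT B =====
-- two-pointer scan: fold over s advancing index j into sub; return j == len(sub)
def RSC_alt (s : String) (sub : String) : Bool :=
  decide (s.toList.foldl
    (fun j c => if j < sub.toList.length && sub.toList.getD j ' ' == c then j + 1 else j) 0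
    = sub.toList.length)

-- ===== PRECONDITION & SPEC =====
-- Pre_RSC excludes exactly the inputs on which A raises IndexError: s nonempty with sub a
-- subsequence of s without its last character (the greedy match exhausts sub before s).
def Pre_RSC (s : String) (sub : String) : Prop :=
  ¬ (s.toList ≠ [] ∧ sub.toList.Sublist s.toList.dropLast)
instance (s : String) (sub : String) : Decidable (Pre_RSC s sub) := by unfold Pre_RSC; infer_instance

def pvWitness_RSC : String × String := ("abc", "abc")

-- On these inputs A raises IndexError (sub exhausted while s remains); B returns True there.
def Raises_RSC (s : String) (sub : String) : Prop :=
  s.toList ≠ [] ∧ sub.toList.Sublist s.toList.dropLast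
instance (s : String) (sub : String) : Decidable (Raises_RSC s sub) := by unfold Raises_RSC; infer_instance
def pvRaiseWitness_RSC : String × String := ("ab", "a")
def pvRaiseWitnessOut_RSC : Bool := true

def Spec_RSC (s : String) (sub : String) (out : Bool) : Prop := out = RSC_alt s sub
instance (s : String) (sub : String) (out : Bool) : Decidable (Spec_RSC s sub out) := by unfold Spec_RSC; infer_instance

-- ===== CLAIM (what is proved, stated in full; the proofs are below) =====
def Claim_equal_RSC : Prop := ∀ (s : String) (sub : String), Dom_RSC s sub → Pre_RSC s sub → Spec_RSC s sub (RSC s sub)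
def Claim_raises_RSC : Prop := (∀ (s : String) (sub : String), Dom_RSC s sub → Raises_RSC s sub → ¬ Pre_RSC s sub) ∧ (Dom_RSC (pvRaiseWitness_RSC.1) (pvRaiseWitness_RSC.2) ∧ Raises_RSC (pvRaiseWitness_RSC.1) (pvRaiseWitness_RSC.2) ∧ RSC_alt (pvRaiseWitness_RSC.1) (pvRaiseWitness_RSC.2) = pvRaiseWitnessOut_RSC)

-- ===== LEMMAS AND PROOFS =====

-- the sub suffix left over after greedily matching sub against s
def grem : List Char → List Char → List Char
  | [], t => t
  | _ :: _, [] => []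
  | c :: s', d :: t' => if c = d then grem s' t' else grem s' (d :: t')

theorem grem_length_le : ∀ (s t : List Char), (grem s t).length ≤ t.length := by
  intro s
  induction s with
  | nil => intro t; simp [grem]
  | cons c s' ih =>
    intro t
    cases t with
    | nil => simp [grem]
    | cons d t' =>
      by_cases h : c = d
      · simpa [grem, h] using Nat.le_succ_of_le (ih t')
      · simpa [grem, h] using ih (d :: t')

-- A equals emptiness of the greedy remainder wherever A does not raise
theorem RSC_go_eq_grem : ∀ (s t : List Char),
    ¬ (s ≠ [] ∧ t.Sublist s.dropLast) → RSC_go s t = (grem s t).isEmpty := by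
  intro s
  induction s with
  | nil =>
    intro t _
    cases t <;> simp [RSC_go, grem]
  | cons c s' ih =>
    intro t hpre
    cases t with
    | nil =>
      exact absurd ⟨by simp, List.nil_sublist _⟩ hpre
    | cons d t' =>
      by_cases h : c = d
      · have hpre' : ¬ (s' ≠ [] ∧ t'.Sublist s'.dropLast) := by
          intro ⟨hne, hsub⟩
          apply hpre
          refine ⟨by simp, ?_⟩
          rw [List.dropLast_cons_of_ne_nil hne, h]
          exact List.Sublist.cons₂ d hsub
        simpa [RSC_go, grem, h] using ih t' hpre'
      · have hpre' : ¬ (s' ≠ [] ∧ (d :: t').Sublist s'.dropLast) := by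
          intro ⟨hne, hsub⟩
          apply hpre
          refine ⟨by simp, ?_⟩
          rw [List.dropLast_cons_of_ne_nil hne]
          exact hsub.cons c
        simpa [RSC_go, grem, h] using ih (d :: t') hpre'

-- B's fold computes len(sub) minus the length of the greedy remainder
theorem grem_nil : ∀ (s : List Char), grem s [] = [] := by
  intro s; cases s <;> simp [grem]

theorem foldl_grem : ∀ (s : List Char) (t : List Char) (j : Nat), j ≤ t.length →
    s.foldl (fun j c => if j < t.length && t.getD j ' ' == c then j + 1 else j) j
      = t.length - (grem s (t.drop j)).length := by
  intro s
  induction s with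
  | nil =>
    intro t j hj
    simp [grem]
    omega
  | cons c s' ih =>
    intro t j hj
    by_cases hlt : j < t.length
    · have hdrop : t.drop j = t[j] :: t.drop (j + 1) := List.drop_eq_getElem_cons hlt
      have hgd : t.getD j ' ' = t[j] := List.getD_eq_getElem t ' ' hlt
      by_cases heq : t.getD j ' ' = c
      · have hget : t[j] = c := by rw [hgd] at heq; exact heq
        simp only [List.foldl_cons]
        rw [if_pos (by rw [hgd]; simp [hlt, hget])]
        rw [ih t (j + 1) hlt, hdrop]
        simp [grem, hget]
      · have hget : ¬ (c = t[j]) := by rw [hgd] at heq; exact fun h => heq h.symm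
        have hne : t[j] ≠ c := fun h => hget h.symm
        simp only [List.foldl_cons]
        rw [if_neg (by rw [hgd]; simp [hne])]
        rw [ih t j hj, hdrop]
        simp [grem, hget]
    · have hdrop : t.drop j = [] := List.drop_eq_nil_of_le (le_of_not_gt hlt)
      simp only [List.foldl_cons]
      rw [if_neg (by simp [hlt])]
      rw [ih t j hj, hdrop]
      simp [grem_nil, grem]

theorem RSC_alt_eq_grem (s sub : String) :
    RSC_alt s sub = (grem s.toList sub.toList).isEmpty := by
  unfold RSC_alt
  rw [foldl_grem s.toList sub.toList 0 (Nat.zero_le _)]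
  have h := grem_length_le s.toList sub.toList
  simp only [List.drop_zero]
  rcases Nat.eq_zero_or_pos (grem s.toList sub.toList).length with hz | hz
  · simp [List.length_eq_zero_iff.mp hz]
  · have hne : sub.length - (grem s.toList sub.toList).length ≠ sub.length := by
      rw [← String.length_toList]; omega
    have h2 : grem s.toList sub.toList ≠ [] := by
      intro hh; rw [hh] at hz; simp at hz
    simp [hne, h2]

-- ===== VERDICT (by name: the statement is the Claim_ definition above) =====
theorem RSC_spec : Claim_equal_RSC := by
  intro s sub _ hpre
  unfold Spec_RSC
  rw [RSC_alt_eq_grem]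
  exact RSC_go_eq_grem s.toList sub.toList hpre

@[simp] theorem RSC_raises : Claim_raises_RSC := by
  unfold Claim_raises_RSC
  exact ⟨fun s sub _ hr hp => hp hr, by decide⟩
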